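-- pv_equiv track=rewrite | github.com/Fabian-Balzer/Randomkingdominion | random_kingdominion/kingdom/kingdom.py | remove_deep_nested_parentheses
-- ===== SOURCE A (Python) =====
-- def remove_deep_nested_parentheses(s: str) -> str:
--     """Remove all parentheses and stuff in them that are nested deeper than one layer,
--     e.g. "Nearby(Druid(_boons_))" -> "Nearby(Druid)".
--     """
--     stack = []
--     result = []
--
--     for char in s:
--         if char == "(":
--             stack.append(char)
--             if len(stack) == 1:
--                 result.append(char)
--         elif char == ")":
--             if len(stack) == 1:
--                 result.append(char)
--             if stack:
--                 stack.pop()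
--         else:
--             if not stack or len(stack) == 1:
--                 result.append(char)
--
--     return "".join(result)
-- ===== SOURCE B (Python) =====
-- def remove_deep_nested_parentheses(s: str) -> str:
--     """Remove all parentheses and stuff in them that are nested deeper than one layer.
--     Recursive-descent over indices: an outer scanner copies text; on '(' it emits '('
--     and hands control to a depth-tracking consumer that copies only depth-1 text,
--     emits the matching ')' and returns control to the outer scanner."""
--     out = []
--     i, n = 0, len(s)
--     while i < n:
--         c = s[i]
--         i += 1
--         if c == "(":
--             out.append("(")
--             depth = 1
--             while i < n and depth > 0:
--                 c2 = s[i]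
--                 i += 1
--                 if c2 == "(":
--                     depth += 1
--                 elif c2 == ")":
--                     depth -= 1
--                     if depth == 0:
--                         out.append(")")
--                 else:
--                     if depth == 1:
--                         out.append(c2)
--         elif c == ")":
--             pass  # stray close paren at top level: dropped
--         else:
--             out.append(c)
--     return "".join(out)
-- ===== Notes on version B (the rewrite author's own statement) =====
-- stated objective: alternative
-- what changed: Replaces the single fold that threads an explicit paren stack alongside the output with a recursive-descent scanner: the outer level copies characters and drops stray ')', and on '(' delegates to an inner depth-counting consumer that copies only depth-1 text and emits the matching ')'.
import Mathlib
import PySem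

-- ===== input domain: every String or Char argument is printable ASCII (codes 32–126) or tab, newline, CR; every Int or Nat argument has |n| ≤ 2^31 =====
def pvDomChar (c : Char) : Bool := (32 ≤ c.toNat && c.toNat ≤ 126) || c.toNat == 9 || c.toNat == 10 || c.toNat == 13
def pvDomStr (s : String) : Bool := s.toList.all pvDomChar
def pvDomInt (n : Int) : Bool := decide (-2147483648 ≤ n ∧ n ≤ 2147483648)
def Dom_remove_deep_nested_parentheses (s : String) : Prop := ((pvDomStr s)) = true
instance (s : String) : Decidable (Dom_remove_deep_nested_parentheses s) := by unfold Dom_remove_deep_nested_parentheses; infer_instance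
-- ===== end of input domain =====

-- B replaces A's stack-threading fold by a recursive-descent scanner (outer copier + inner depth-1 consumer); alternative decomposition, same cost.

-- ===== PORT A =====
-- one iteration of A's for-loop: state = (stack, result)
def pvAStep (st : List Char × List Char) (c : Char) : List Char × List Char :=
  let stack := st.1
  let result := st.2
  if c = '(' then
    let stack' := stack ++ [c]
    (stack', if stack'.length = 1 then result ++ [c] else result)
  else if c = ')' then
    let result' := if stack.length = 1 then result ++ [c] else result
    (if stack ≠ [] then stack.dropLast else stack, result')
  else
    if stack = [] ∨ stack.length = 1 then (stack, result ++ [c]) else (stack, result)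

def remove_deep_nested_parentheses (s : String) : String :=
  String.mk ((s.toList.foldl pvAStep ([], [])).2)

-- ===== PORT B =====
mutual
-- inner consumer: inside parentheses at depth `d ≥ 1`; copies depth-1 text, emits the matching ')'
def pvBInner : List Char → Nat → List Char
  | [], _ => []
  | c :: rest, d =>
    if c = '(' then pvBInner rest (d + 1)
    else if c = ')' then
      if d = 1 then ')' :: pvBOuter rest else pvBInner rest (d - 1)
    else if d = 1 then c :: pvBInner rest d else pvBInner rest d
-- outer scanner: copies characters, drops stray ')', descends on '('
def pvBOuter : List Char → List Char
  | [] => []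
  | c :: rest =>
    if c = '(' then '(' :: pvBInner rest 1
    else if c = ')' then pvBOuter rest
    else c :: pvBOuter rest
end

def remove_deep_nested_parentheses_alt (s : String) : String :=
  String.mk (pvBOuter s.toList)

-- ===== PRECONDITION & SPEC =====
def Spec_remove_deep_nested_parentheses (s : String) (out : String) : Prop := out = remove_deep_nested_parentheses_alt s
instance (s : String) (out : String) : Decidable (Spec_remove_deep_nested_parentheses s out) := by unfold Spec_remove_deep_nested_parentheses; infer_instance

-- ===== CLAIM (what is proved, stated in full; the proofs are below) =====
def Claim_equal_remove_deep_nested_parentheses : Prop := ∀ (s : String), Dom_remove_deep_nested_parentheses s → Spec_remove_deep_nested_parentheses s (remove_deep_nested_parentheses s)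

-- ===== LEMMAS AND PROOFS =====

-- continuation of B corresponding to A's stack of length d
def pvBCont (l : List Char) (d : Nat) : List Char :=
  if d = 0 then pvBOuter l else pvBInner l d

-- A's loop only looks at the stack's length; its result from any state is the
-- accumulated result followed by B's continuation at the current depth.
theorem pvLoop_eq (l : List Char) : ∀ (stack res : List Char),
    (l.foldl pvAStep (stack, res)).2 = res ++ pvBCont l stack.length := by
  induction l with
  | nil => intro stack res; simp [pvBCont, pvBOuter, pvBInner]
  | cons c rest ih =>
    intro stack res
    by_cases hc : c = '('
    · subst hc
      rcases stack with _ | ⟨x, xs⟩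
      · simp [List.foldl, pvAStep, ih, pvBCont, pvBOuter]
      · simp [List.foldl, pvAStep, ih, pvBCont, pvBInner]
    · by_cases hc2 : c = ')'
      · subst hc2
        rcases stack with _ | ⟨x, xs⟩
        · simp [List.foldl, pvAStep, hc, ih, pvBCont, pvBOuter]
        · rcases xs with _ | ⟨y, ys⟩
          · simp [List.foldl, pvAStep, hc, ih, pvBCont, pvBInner]
          · simp [List.foldl, pvAStep, hc, ih, pvBCont, pvBInner]
      · rcases stack with _ | ⟨x, xs⟩
        · simp [List.foldl, pvAStep, hc, hc2, ih, pvBCont, pvBOuter]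
        · rcases xs with _ | ⟨y, ys⟩
          · simp [List.foldl, pvAStep, hc, hc2, ih, pvBCont, pvBInner]
          · simp [List.foldl, pvAStep, hc, hc2, ih, pvBCont, pvBInner]

-- ===== VERDICT (by name: the statement is the Claim_ definition above) =====
theorem remove_deep_nested_parentheses_spec : Claim_equal_remove_deep_nested_parentheses := by
  intro s _
  unfold Spec_remove_deep_nested_parentheses remove_deep_nested_parentheses remove_deep_nested_parentheses_alt
  rw [pvLoop_eq]
  simp [pvBCont]
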